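-- pv_equiv track=rewrite | github.com/wddimple6/afkak | tools/gentravis.py | group_envs
-- ===== SOURCE A (Python) =====
-- def group_envs(envlist):
--     """Group Tox environments for Travis CI builds
--
--     Separate by Python version so that they can go in different Travis jobs:
--
--     >>> group_envs('py37-int-snappy', 'py36-int')
--     [('py36', 'int', ['py36-int']), ('py37', 'int', ['py37-int-snappy'])]
--
--     Group unit tests and linting together:
--
--     >>> group_envs(['py27-unit', 'py27-lint'])
--     [('py27', 'unit', ['py27-unit', 'py27-lint'])]
--     """
--     groups = {}
--     for env in envlist:
--         envpy, category = env.split('-')[0:2]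
--
--         if category == 'lint':
--             category = 'unit'
--
--         try:
--             groups[envpy, category].append(env)
--         except KeyError:
--             groups[envpy, category] = [env]
--
--     return sorted((envpy, category, envs) for (envpy, category), envs in groups.items())
-- ===== SOURCE B (Python) =====
-- def group_envs(envlist):
--     """Group Tox environments for Travis CI builds (idiomatic re-implementation:
--     sorted distinct keys + one filtering comprehension per key; no dict, no try/except)."""
--     def key(env):
--         envpy, category = env.split('-')[0:2]
--         return (envpy, 'unit' if category == 'lint' else category)
--
--     return [(envpy, category,
--              [env for env in envlist if key(env) == (envpy, category)])
--             for envpy, category in sorted({key(env) for env in envlist})]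
-- ===== Notes on version B (the rewrite author's own statement) =====
-- stated objective: idiomatic
-- what changed: Replaces the try/except dict-of-lists accumulation plus final sort of triples by computing the sorted set of distinct (envpy, category) keys and building each group with one filtering pass over the input; within-group order is input order in both.
import Mathlib
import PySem

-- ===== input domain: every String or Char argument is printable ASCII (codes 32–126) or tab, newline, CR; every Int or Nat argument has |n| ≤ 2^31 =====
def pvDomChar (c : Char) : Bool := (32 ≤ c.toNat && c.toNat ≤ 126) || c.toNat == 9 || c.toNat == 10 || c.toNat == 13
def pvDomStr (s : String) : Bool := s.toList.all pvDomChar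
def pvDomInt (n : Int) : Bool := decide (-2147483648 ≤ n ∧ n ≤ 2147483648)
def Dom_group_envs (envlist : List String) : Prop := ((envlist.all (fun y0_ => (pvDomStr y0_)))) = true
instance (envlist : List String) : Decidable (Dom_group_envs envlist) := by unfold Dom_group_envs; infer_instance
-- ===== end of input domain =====

-- B is the idiomatic rewrite: sorted distinct (envpy, category) keys, one filtering pass per key;
-- A's dict-of-lists + try/except + final sort disappear. Equivalence of return values is proved on
-- inputs where every env splits into at least two '-'-pieces (elsewhere Python A raises ValueError).

-- ===== PORT A =====
-- A's sort key is the whole triple (envpy, category, envs); the (envpy, category) prefixes are the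
-- distinct keys of the dict, so Python's tuple comparison never reaches the list component and
-- sorting by the first two components (sorted2) is exact.
def group_envs (envlist : List String) : List (String × String × List String) :=
  let groups := envlist.foldl
    (fun (d : PySem.Dict (String × String) (List String)) env =>
      let parts := PySem.List.slice ((PySem.Str.split? env "-").getD []) (some 0) (some 2)
      let envpy := parts[0]?.getD ""        -- Pre_ guarantees two pieces: the "" defaults are never used
      let category0 := parts[1]?.getD ""
      let category := if category0 = "lint" then "unit" else category0
      match d.get? (envpy, category) with   -- try: append / except KeyError: fresh singleton
      | some envs => d.insert (envpy, category) (envs ++ [env])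
      | none => d.insert (envpy, category) [env])
    PySem.Dict.empty
  PySem.List.sorted2 (groups.items.map (fun p => (p.1.1, p.1.2, p.2)))
    (fun t => t.1) (fun t => t.2.1)

-- ===== PORT B =====
-- Source B's nested 'key' helper
def pvKeyB (env : String) : String × String :=
  let parts := PySem.List.slice ((PySem.Str.split? env "-").getD []) (some 0) (some 2)
  let envpy := parts[0]?.getD ""
  let category := parts[1]?.getD ""
  (envpy, if category = "lint" then "unit" else category)

def group_envs_alt (envlist : List String) : List (String × String × List String) :=
  (PySem.List.sorted2 (PySem.Set.ofList (envlist.map pvKeyB)) (fun k => k.1) (fun k => k.2)).map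
    (fun k => (k.1, k.2, envlist.filter (fun env => pvKeyB env == k)))

-- ===== PRECONDITION & SPEC =====
-- Pre_ excludes exactly the envs without a '-' : there Python A raises ValueError (unpacking a 1-element slice).
def Pre_group_envs (envlist : List String) : Prop :=
  ∀ env ∈ envlist, 2 ≤ ((PySem.Str.split? env "-").getD []).length
instance (envlist : List String) : Decidable (Pre_group_envs envlist) := by unfold Pre_group_envs; infer_instance

def pvWitness_group_envs : List String := ["py37-int-snappy", "py36-int", "py27-unit", "py27-lint"]

def Spec_group_envs (envlist : List String) (out : List (String × String × List String)) : Prop := out = group_envs_alt envlist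
instance (envlist : List String) (out : List (String × String × List String)) : Decidable (Spec_group_envs envlist out) := by unfold Spec_group_envs; infer_instance

-- ===== CLAIM (what is proved, stated in full; the proofs are below) =====
def Claim_equal_group_envs : Prop := ∀ (envlist : List String), Dom_group_envs envlist → Pre_group_envs envlist → Spec_group_envs envlist (group_envs envlist)

-- ===== LEMMAS AND PROOFS =====

-- sorted2 is sorted with the lexicographic pair key (Python's tuple comparison)
theorem sorted2_eq_sorted_toLex {α : Type} {κ₁ κ₂ : Type} [LinearOrder κ₁] [LinearOrder κ₂]
    (xs : List α) (k1 : α → κ₁) (k2 : α → κ₂) :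
    PySem.List.sorted2 xs k1 k2 = PySem.List.sorted xs (fun x => toLex (k1 x, k2 x)) := by
  unfold PySem.List.sorted2 PySem.List.sorted
  show xs.foldl (fun acc x => PySem.List.insertBy
      (fun a b => decide (k1 a < k1 b) || !decide (k1 b < k1 a) && decide (k2 a < k2 b)) x acc) [] =
    xs.foldl (fun acc x => PySem.List.insertBy
      (fun a b => decide (toLex (k1 a, k2 a) < toLex (k1 b, k2 b))) x acc) []
  congr 1
  funext acc x
  congr 1
  funext a b
  simp only [Prod.Lex.lt_iff]
  by_cases h1 : k1 a < k1 b
  · simp [h1]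
  · by_cases h2 : k1 b < k1 a
    · have hne : k1 a ≠ k1 b := fun heq => absurd h2 (by simp [heq])
      simp [h1, h2, hne]
    · have heq : k1 a = k1 b := le_antisymm (not_lt.mp h2) (not_lt.mp h1)
      simp [heq]

-- A's loop body is a dict 'modify' with key pvKeyB
theorem stepA_eq_modify (d : PySem.Dict (String × String) (List String)) (env : String) :
    (let parts := PySem.List.slice ((PySem.Str.split? env "-").getD []) (some 0) (some 2)
     let envpy := parts[0]?.getD ""
     let category0 := parts[1]?.getD ""
     let category := if category0 = "lint" then "unit" else category0
     match d.get? (envpy, category) with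
     | some envs => d.insert (envpy, category) (envs ++ [env])
     | none => d.insert (envpy, category) [env]) =
    d.modify (pvKeyB env) [] (fun l => l ++ [env]) := by
  show (match d.get? (pvKeyB env) with
    | some envs => d.insert (pvKeyB env) (envs ++ [env])
    | none => d.insert (pvKeyB env) [env]) =
    d.modify (pvKeyB env) [] (fun l => l ++ [env])
  unfold PySem.Dict.modify
  rw [PySem.Dict.getD_eq_get?_getD]
  cases h : d.get? (pvKeyB env) <;> simp

-- a dict with Nodup keys is determined by its keys and getD
theorem items_eq_map_keys {κ ν : Type} [BEq κ] [LawfulBEq κ]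
    (d : PySem.Dict κ ν) (dflt : ν) (h : d.keys.Nodup) :
    d.items = d.keys.map (fun k => (k, d.getD k dflt)) := by
  apply List.ext_getElem
  · simp [PySem.Dict.keys]
  · intro i hi hi'
    have hk : d.keys[i]'(by simpa [PySem.Dict.keys] using hi) = d.items[i].1 := by
      simp [PySem.Dict.keys]
    have hmem : (d.items[i].1, d.items[i].2) ∈ d.items := by
      have hm := List.getElem_mem hi
      exact (Prod.mk.eta (p := d.items[i])).symm ▸ hm
    have := PySem.Dict.get?_of_mem_items d hmem h
    simp only [List.getElem_map, hk]
    rw [PySem.Dict.getD_eq_get?_getD, this]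
    simp

-- the grouping dict of A, fully characterised
theorem dictA_items (envlist : List String) :
    (envlist.foldl (fun (d : PySem.Dict (String × String) (List String)) env =>
        d.modify (pvKeyB env) [] (fun l => l ++ [env])) PySem.Dict.empty).items =
      (PySem.Set.ofList (envlist.map pvKeyB)).map
        (fun k => (k, envlist.filter (fun env => pvKeyB env == k))) := by
  set d := envlist.foldl (fun (d : PySem.Dict (String × String) (List String)) env =>
      d.modify (pvKeyB env) [] (fun l => l ++ [env])) PySem.Dict.empty with hd
  have hkeys : d.keys = PySem.Set.ofList (envlist.map pvKeyB) := by
    rw [hd, PySem.Dict.keys_foldl_modify_key envlist pvKeyB [] (fun _ env => fun l => l ++ [env])]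
    simp [PySem.Set.update_nil_left]
  have hnodup : d.keys.Nodup := by
    rw [hkeys]; exact PySem.Set.nodup_ofList _
  have hgetD : ∀ k, d.getD k [] = envlist.filter (fun env => pvKeyB env == k) := by
    intro k
    have hfold : d = (envlist.map (fun env => (pvKeyB env, env))).foldl
        (fun d p => d.modify p.1 [] (fun l => l ++ [p.2])) PySem.Dict.empty := by
      rw [hd, List.foldl_map]
    rw [hfold, PySem.Dict.getD_foldl_modify_append]
    simp [List.filter_map, Function.comp_def, List.map_map]
  rw [items_eq_map_keys d [] hnodup, hkeys]
  exact List.map_congr_left (fun k _ => by rw [hgetD])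

-- the lexicographic pair key is injective on triples whose key is the (envpy, category) prefix
theorem pairKey_inj : Function.Injective (fun k : String × String => toLex (k.1, k.2)) := by
  intro a b h
  have := congrArg ofLex h
  simpa [Prod.ext_iff] using this

-- sorting the mapped triples by their key prefix = mapping the sorted keys
theorem sorted_map_of_nodup (K : List (String × String))
    (hK : K.Nodup) (F : String × String → List String) :
    PySem.List.sorted (K.map (fun k => (k.1, k.2, F k))) (fun t => toLex (t.1, t.2.1)) =
      (PySem.List.sorted K (fun k => toLex (k.1, k.2))).map (fun k => (k.1, k.2, F k)) := by
  apply PySem.List.sorted_eq_of_perm_of_pairwise_lt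
  · exact ((PySem.List.sorted_perm K _ false).map _)
  · have hle := PySem.List.sorted_pairwise K (fun k => toLex (k.1, k.2))
    have hnd : (PySem.List.sorted K (fun k => toLex (k.1, k.2)) false).Nodup :=
      (PySem.List.sorted_perm K _ false).nodup_iff.mpr hK
    have hlt : (PySem.List.sorted K (fun k => toLex (k.1, k.2)) false).Pairwise
        (fun a b => toLex (a.1, a.2) < toLex (b.1, b.2)) := by
      refine (hle.and hnd).imp ?_
      rintro a b ⟨h1, h2⟩
      exact lt_of_le_of_ne h1 (fun hc => h2 (pairKey_inj hc))
    rw [List.pairwise_map]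
    exact hlt

-- ===== VERDICT (by name: the statement is the Claim_ definition above) =====
theorem group_envs_spec : Claim_equal_group_envs := by
  intro envlist _ _
  unfold Spec_group_envs group_envs group_envs_alt
  have hstep : (fun (d : PySem.Dict (String × String) (List String)) env =>
      let parts := PySem.List.slice ((PySem.Str.split? env "-").getD []) (some 0) (some 2)
      let envpy := parts[0]?.getD ""
      let category0 := parts[1]?.getD ""
      let category := if category0 = "lint" then "unit" else category0
      match d.get? (envpy, category) with
      | some envs => d.insert (envpy, category) (envs ++ [env])
      | none => d.insert (envpy, category) [env]) =
      (fun d env => d.modify (pvKeyB env) [] (fun l => l ++ [env])) := by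
    funext d env; exact stepA_eq_modify d env
  rw [hstep]
  simp only [dictA_items envlist, List.map_map]
  rw [sorted2_eq_sorted_toLex, sorted2_eq_sorted_toLex]
  have : ((fun p : (String × String) × List String => (p.1.1, p.1.2, p.2)) ∘
      (fun k => (k, envlist.filter (fun env => pvKeyB env == k)))) =
      (fun k : String × String => (k.1, k.2, envlist.filter (fun env => pvKeyB env == k))) := rfl
  rw [this]
  exact sorted_map_of_nodup _ (PySem.Set.nodup_ofList _) _
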